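-- pv_equiv track=rewrite | github.com/arcasilesgroup/ai-engineering | tools/skill_lint/checks/pair_aware.py | _consecutive_overlap
-- ===== SOURCE A (Python) =====
-- def _consecutive_overlap(a: list[str], b: list[str], min_run: int = 3) -> list[str]:
--     """Return the longest run of headings appearing IN ORDER in both sequences.
--
--     Brief contract: ≥3 consecutive matches → fail. We use a simple
--     sliding-window scan: for each window of size ``min_run`` in ``a``,
--     check whether the same sequence (in order) appears anywhere in
--     ``b``. Returns the first matched run, or empty list.
--     """
--     if len(a) < min_run or len(b) < min_run:
--         return []
--     for i in range(len(a) - min_run + 1):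
--         window = a[i : i + min_run]
--         # Walk b looking for window as a contiguous slice.
--         for j in range(len(b) - min_run + 1):
--             if b[j : j + min_run] == window:
--                 return window
--     return []
-- ===== SOURCE B (Python) =====
-- def _consecutive_overlap(a: list[str], b: list[str], min_run: int = 3) -> list[str]:
--     """Longest-common-run dynamic programming (LCS-substring style): one O(n*m)
--     table pass records, for every position p of a, whether a run of length
--     min_run ending at a[p] also ends somewhere in b; then one scan of a picks
--     the first window."""
--     if min_run <= 0:
--         return []
--     if len(a) < min_run or len(b) < min_run:
--         return []
--     prev = [0] * len(b)  # run lengths of common suffixes ending at a[p-1], b[j]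
--     ok = []  # ok[p]: some common run of length >= min_run ends at a[p]
--     for x in a:
--         cur = []
--         left = 0  # prev[j-1]: the diagonal neighbour
--         for j, y in enumerate(b):
--             cur.append(left + 1 if x == y else 0)
--             left = prev[j]
--         ok.append(any(v >= min_run for v in cur))
--         prev = cur
--     for i in range(len(a) - min_run + 1):
--         if ok[i + min_run - 1]:
--             return a[i : i + min_run]
--     return []
-- ===== Notes on version B (the rewrite author's own statement) =====
-- stated objective: alternative
-- what changed: B replaces A's per-window rescan of b by a single longest-common-run dynamic-programming pass (LCS-substring style) that records for every position of a whether a run of length min_run ending there also ends in b, then picks the first window in one scan of a.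
-- outside the precondition, e.g. on _consecutive_overlap(['y', 'x', 'x', 'z', 'y'], ['z', 'y', 'y', 'x', 'x'], -3): A returns ['y', 'x'], B returns []
import Mathlib
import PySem

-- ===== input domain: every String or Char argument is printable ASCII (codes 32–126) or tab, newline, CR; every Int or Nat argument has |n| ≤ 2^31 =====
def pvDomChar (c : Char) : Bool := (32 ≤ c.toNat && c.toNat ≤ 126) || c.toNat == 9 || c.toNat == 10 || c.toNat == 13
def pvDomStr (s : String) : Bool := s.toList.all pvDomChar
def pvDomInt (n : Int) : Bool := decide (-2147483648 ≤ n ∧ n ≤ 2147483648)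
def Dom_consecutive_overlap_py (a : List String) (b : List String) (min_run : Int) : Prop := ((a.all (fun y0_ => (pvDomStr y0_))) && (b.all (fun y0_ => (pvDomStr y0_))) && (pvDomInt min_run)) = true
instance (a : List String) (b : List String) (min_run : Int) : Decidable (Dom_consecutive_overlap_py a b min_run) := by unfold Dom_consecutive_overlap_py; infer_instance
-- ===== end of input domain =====

-- B replaces A's rescan of b for every window of a by one LCS-substring style
-- dynamic-programming pass over the a×b table (objective: alternative algorithm).

-- ===== PORT A =====
-- inner 'for j in range(len(b) - min_run + 1)' loop: counts j up to hi, returns the window on the first matching slice of b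
def pvAInner (b window : List String) (min_run hi j : Int) : Option (List String) :=
  if _h : j < hi then
    if PySem.List.slice b (some j) (some (j + min_run)) = window then some window
    else pvAInner b window min_run hi (j + 1)
  else none
termination_by (hi - j).toNat
decreasing_by omega

-- outer 'for i in range(len(a) - min_run + 1)' loop over windows of a
def pvAOuter (a b : List String) (min_run hiA hiB i : Int) : List String :=
  if _h : i < hiA then
    -- window = a[i : i + min_run], inlined
    match pvAInner b (PySem.List.slice a (some i) (some (i + min_run))) min_run hiB 0 with
    | some w => w
    | none => pvAOuter a b min_run hiA hiB (i + 1)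
  else []
termination_by (hiA - i).toNat
decreasing_by omega

def consecutive_overlap_py (a : List String) (b : List String) (min_run : Int) : List String :=
  if (a.length : Int) < min_run ∨ (b.length : Int) < min_run then []
  else pvAOuter a b min_run ((a.length : Int) - min_run + 1) ((b.length : Int) - min_run + 1) 0

-- ===== PORT B =====
-- inner 'for j, y in enumerate(b)' loop of Source B: builds cur; prev is the not-yet-read
-- suffix of the previous row (so prev.headD 0 is python's 'left = prev[j]')
def pvRow (x : String) : List String → List Nat → Nat → List Nat
  | [], _, _ => []
  | y :: bs, prev, left =>
      (if x = y then left + 1 else 0) :: pvRow x bs prev.tail (prev.headD 0)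

-- outer 'for x in a' loop of Source B: ok.append(any(v >= min_run for v in cur)); prev = cur
def pvRows (mr : Int) : List String → List String → List Nat → List Bool
  | [], _, _ => []
  | x :: as_, b, prev =>
      let cur := pvRow x b prev 0
      (cur.any (fun v => decide (mr ≤ (v : Int)))) :: pvRows mr as_ b cur

-- final 'for i in range(len(a) - min_run + 1)' scan of Source B (ok[i+min_run-1] is always in range)
def pvBFind (a : List String) (ok : List Bool) (mr hi i : Int) : List String :=
  if _h : i < hi then
    if (PySem.List.pyGet? ok (i + mr - 1)).getD false
    then PySem.List.slice a (some i) (some (i + mr))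
    else pvBFind a ok mr hi (i + 1)
  else []
termination_by (hi - i).toNat
decreasing_by omega

def consecutive_overlap_py_alt (a : List String) (b : List String) (min_run : Int) : List String :=
  if min_run ≤ 0 then []
  else if (a.length : Int) < min_run ∨ (b.length : Int) < min_run then []
  else pvBFind a (pvRows min_run a b (List.replicate b.length 0)) min_run
        ((a.length : Int) - min_run + 1) 0

-- ===== PRECONDITION & SPEC =====
-- Pre_ excludes negative min_run, outside the natural domain (a run length cannot be negative):
-- there A's window a[i:i+min_run] is a degenerate negative-index slice, not a length-min_run run, and B returns [].
def Pre_consecutive_overlap_py (_a : List String) (_b : List String) (min_run : Int) : Prop := 0 ≤ min_run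
instance (a : List String) (b : List String) (min_run : Int) : Decidable (Pre_consecutive_overlap_py a b min_run) := by unfold Pre_consecutive_overlap_py; infer_instance
def pvWitness_consecutive_overlap_py : List String × List String × Int := (["x", "y", "z", "w"], ["q", "y", "z", "w"], 3)
def Spec_consecutive_overlap_py (a : List String) (b : List String) (min_run : Int) (out : List String) : Prop := out = consecutive_overlap_py_alt a b min_run
instance (a : List String) (b : List String) (min_run : Int) (out : List String) : Decidable (Spec_consecutive_overlap_py a b min_run out) := by unfold Spec_consecutive_overlap_py; infer_instance

-- ===== CLAIM (what is proved, stated in full; the proofs are below) =====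
def Claim_equal_consecutive_overlap_py : Prop := ∀ (a : List String) (b : List String) (min_run : Int), Dom_consecutive_overlap_py a b min_run → Pre_consecutive_overlap_py a b min_run → Spec_consecutive_overlap_py a b min_run (consecutive_overlap_py a b min_run)

-- ===== LEMMAS AND PROOFS =====

-- length of the common prefix of two lists (the value Source B's DP computes per cell)
def pvCpl : List String → List String → Nat
  | x :: u, y :: v => if x = y then pvCpl u v + 1 else 0
  | _, _ => 0

theorem pvCpl_cons (x y : String) (u v : List String) :
    pvCpl (x :: u) (y :: v) = if x = y then pvCpl u v + 1 else 0 := rfl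

theorem pvCpl_nil_right (u : List String) : pvCpl u [] = 0 := by cases u <;> rfl

theorem pvCpl_nil_left (v : List String) : pvCpl [] v = 0 := by cases v <;> rfl

-- the row of DP values for processed (reversed) a-prefix ra, over the b-suffix bs
-- (rb = reversed already-consumed b-prefix)
def pvPrevVals (ra rb : List String) : List String → List Nat
  | [] => []
  | y :: bs => pvCpl ra (y :: rb) :: pvPrevVals ra (y :: rb) bs

def pvAnyRow (mr : Int) (b : List String) (u : List String) : Bool :=
  (pvPrevVals u [] b).any (fun v => decide (mr ≤ (v : Int)))

theorem pvPrevVals_nil (rb bs : List String) :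
    pvPrevVals [] rb bs = List.replicate bs.length 0 := by
  induction bs generalizing rb with
  | nil => rfl
  | cons y bs ih => simp [pvPrevVals, pvCpl_nil_left, ih, List.replicate_succ]

theorem pvRow_step (x : String) (ra : List String) :
    ∀ (bs rb : List String),
      pvRow x bs (pvPrevVals ra rb bs) (pvCpl ra rb) = pvPrevVals (x :: ra) rb bs := by
  intro bs
  induction bs with
  | nil => intro rb; rfl
  | cons y bs ih =>
      intro rb
      simp only [pvPrevVals, pvRow, List.tail_cons, List.headD_cons, pvCpl_cons]
      rw [ih (y :: rb)]

theorem pvPrevVals_eq_map (ra : List String) :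
    ∀ (bs rb : List String),
      pvPrevVals ra rb bs =
        (List.range bs.length).map (fun j => pvCpl ra ((bs.take (j + 1)).reverse ++ rb)) := by
  intro bs
  induction bs with
  | nil => intro rb; rfl
  | cons y bs ih =>
      intro rb
      simp only [pvPrevVals, List.length_cons, List.range_succ_eq_map, List.map_cons,
        List.map_map]
      refine List.cons_eq_cons.mpr ⟨by simp, ?_⟩
      rw [ih (y :: rb)]
      apply List.map_congr_left
      intro j _
      simp [Function.comp, Nat.succ_eq_add_one, List.take_succ_cons, List.reverse_cons,
        List.append_assoc]

theorem pvRows_eq (mr : Int) (b : List String) :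
    ∀ (as_ ra : List String),
      pvRows mr as_ b (pvPrevVals ra [] b) =
        (List.range as_.length).map
          (fun p => pvAnyRow mr b ((as_.take (p + 1)).reverse ++ ra)) := by
  intro as_
  induction as_ with
  | nil => intro ra; rfl
  | cons x as_ ih =>
      intro ra
      have hrow : pvRow x b (pvPrevVals ra [] b) 0 = pvPrevVals (x :: ra) [] b := by
        have := pvRow_step x ra b []
        rwa [pvCpl_nil_right] at this
      simp only [pvRows, hrow, List.length_cons, List.range_succ_eq_map, List.map_cons,
        List.map_map]
      refine List.cons_eq_cons.mpr ⟨by simp [pvAnyRow], ?_⟩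
      rw [ih (x :: ra)]
      apply List.map_congr_left
      intro p _
      simp [pvAnyRow, Function.comp, Nat.succ_eq_add_one, List.take_succ_cons, List.reverse_cons,
        List.append_assoc]

theorem pvCpl_ge_iff (m : Nat) :
    ∀ (u v : List String),
      m ≤ pvCpl u v ↔ (m ≤ u.length ∧ m ≤ v.length ∧ u.take m = v.take m) := by
  induction m with
  | zero => intro u v; simp
  | succ m ih =>
      intro u v
      cases u with
      | nil => simp [pvCpl_nil_left]
      | cons x u =>
          cases v with
          | nil => simp [pvCpl_nil_right]
          | cons y v =>
              by_cases hxy : x = y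
              · subst hxy
                rw [pvCpl_cons, if_pos rfl]
                simp only [List.length_cons, List.take_succ_cons]
                constructor
                · intro h
                  have := (ih u v).mp (by omega)
                  exact ⟨by omega, by omega, by simp [this.2.2]⟩
                · intro ⟨h1, h2, h3⟩
                  have := (ih u v).mpr ⟨by omega, by omega, by simpa using h3⟩
                  omega
              · rw [pvCpl_cons, if_neg hxy]
                simp only [List.take_succ_cons]
                constructor
                · omega
                · intro ⟨_, _, h3⟩
                  exact absurd (List.cons.injEq .. ▸ h3).1 hxy

-- the first m of a reversed k-prefix is the reversed window of length m ending at k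
theorem pvRevTake (l : List String) (k m : Nat) (h : m ≤ k) (hk : k ≤ l.length) :
    ((l.take k).reverse).take m = ((l.drop (k - m)).take m).reverse := by
  rw [List.take_reverse, List.length_take, Nat.min_eq_left hk, List.drop_take,
    Nat.sub_sub_self h]

-- the DP's per-position flag says: a window of b of length m matches the window of a ending there
theorem pvAnyRow_iff (mN : Nat) (a b : List String) (i : Nat)
    (hm : 0 < mN) (hia : i + mN ≤ a.length) :
    pvAnyRow (mN : Int) b ((a.take (i + mN)).reverse) = true ↔
      ∃ j : Nat, j + mN ≤ b.length ∧ (b.drop j).take mN = (a.drop i).take mN := by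
  have ea : ((a.take (i + mN)).reverse).take mN = ((a.drop i).take mN).reverse := by
    have h := pvRevTake a (i + mN) mN (by omega) hia
    rwa [Nat.add_sub_cancel] at h
  unfold pvAnyRow
  rw [pvPrevVals_eq_map, List.any_map, List.any_eq_true]
  constructor
  · rintro ⟨j, hj, hcond⟩
    simp only [Function.comp, decide_eq_true_eq, Nat.cast_le, List.append_nil] at hcond
    rw [List.mem_range] at hj
    obtain ⟨h1, h2, h3⟩ := (pvCpl_ge_iff mN _ _).mp hcond
    simp only [List.length_reverse, List.length_take] at h1 h2
    refine ⟨j + 1 - mN, by omega, ?_⟩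
    have eb : ((b.take (j + 1)).reverse).take mN = ((b.drop (j + 1 - mN)).take mN).reverse :=
      pvRevTake b (j + 1) mN (by omega) (by omega)
    rw [ea, eb] at h3
    exact List.reverse_injective h3.symm
  · rintro ⟨j', hj', heq⟩
    refine ⟨j' + mN - 1, List.mem_range.mpr (by omega), ?_⟩
    simp only [Function.comp, decide_eq_true_eq, Nat.cast_le, List.append_nil]
    apply (pvCpl_ge_iff mN _ _).mpr
    have hj1 : j' + mN - 1 + 1 = j' + mN := by omega
    refine ⟨by simp only [List.length_reverse, List.length_take]; omega,
            by simp only [List.length_reverse, List.length_take]; omega, ?_⟩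
    have eb : ((b.take (j' + mN - 1 + 1)).reverse).take mN = ((b.drop j').take mN).reverse := by
      have := pvRevTake b (j' + mN) mN (by omega) (by omega)
      rw [hj1, this, Nat.add_sub_cancel]
    rw [ea, eb, heq]

-- A's inner loop returns `some window` iff window occurs among b's slices at indices j..hi-1.
theorem pvAInner_eq (b w : List String) (m hi j : Int) :
    pvAInner b w m hi j =
      if w ∈ (PySem.List.pyRange j hi 1).map (fun k => PySem.List.slice b (some k) (some (k + m)))
      then some w else none := by
  fun_induction pvAInner b w m hi j with
  | case1 j h hs =>
    rw [PySem.List.pyRange_one_cons h, List.map_cons,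
        if_pos (List.mem_cons.mpr (Or.inl hs.symm))]
  | case2 j h hs ih =>
    rw [PySem.List.pyRange_one_cons h, List.map_cons, ih]
    have hne : ¬ w = PySem.List.slice b (some j) (some (j + m)) := fun e => hs e.symm
    by_cases hm2 : w ∈ (PySem.List.pyRange (j + 1) hi 1).map
        (fun k => PySem.List.slice b (some k) (some (k + m)))
    · rw [if_pos hm2, if_pos (List.mem_cons.mpr (Or.inr hm2))]
    · rw [if_neg hm2, if_neg (by simp [List.mem_cons, hne, hm2])]
  | case3 j h =>
    rw [PySem.List.pyRange_one_eq_nil (by omega)]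
    simp

-- A's inner search over b, in Nat window form
theorem pvAInner_iff (mN : Nat) (a b : List String) (i : Nat) :
    (pvAInner b (PySem.List.slice a (some (i : Int)) (some ((i : Int) + (mN : Int)))) (mN : Int)
        ((b.length : Int) - (mN : Int) + 1) 0 ≠ none) ↔
      ∃ j : Nat, j + mN ≤ b.length ∧ (b.drop j).take mN = (a.drop i).take mN := by
  rw [pvAInner_eq, PySem.List.slice_natCast_add]
  constructor
  · intro h
    by_cases hmem : (a.drop i).take mN ∈
        (PySem.List.pyRange 0 ((b.length : Int) - (mN : Int) + 1) 1).map
          (fun k => PySem.List.slice b (some k) (some (k + (mN : Int))))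
    · obtain ⟨k, hk, hkeq⟩ := List.mem_map.mp hmem
      rw [PySem.List.mem_pyRange_one] at hk
      obtain ⟨j, rfl⟩ := Int.eq_ofNat_of_zero_le hk.1
      refine ⟨j, by omega, ?_⟩
      rwa [PySem.List.slice_natCast_add] at hkeq
    · rw [if_neg hmem] at h; exact absurd rfl h
  · rintro ⟨j, hj, heq⟩
    have hmem : (a.drop i).take mN ∈
        (PySem.List.pyRange 0 ((b.length : Int) - (mN : Int) + 1) 1).map
          (fun k => PySem.List.slice b (some k) (some (k + (mN : Int)))) := by
      refine List.mem_map.mpr ⟨(j : Int), ?_, ?_⟩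
      · rw [PySem.List.mem_pyRange_one]; omega
      · rw [PySem.List.slice_natCast_add]; exact heq
    rw [if_pos hmem]
    simp

-- B's flag list, looked up at python's ok[i + min_run - 1]
theorem pvOkEntry (mN : Nat) (a b : List String) (i : Nat)
    (hm : 0 < mN) (hia : i + mN ≤ a.length) :
    PySem.List.pyGet? (pvRows (mN : Int) a b (List.replicate b.length 0))
        ((i : Int) + (mN : Int) - 1) =
      some (pvAnyRow (mN : Int) b ((a.take (i + mN)).reverse)) := by
  rw [← pvPrevVals_nil [] b, pvRows_eq]
  have hidx : (i : Int) + (mN : Int) - 1 = ((i + mN - 1 : Nat) : Int) := by omega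
  rw [hidx, PySem.List.pyGet?_natCast, List.getElem?_map,
    List.getElem?_range (by omega : i + mN - 1 < a.length)]
  have h1 : i + mN - 1 + 1 = i + mN := by omega
  simp only [Option.map_some, List.append_nil, h1]

-- the two final scans agree step by step
theorem pvScan_eq (mN : Nat) (a b : List String) (hm : 0 < mN) :
    ∀ (i : Nat),
      pvAOuter a b (mN : Int) ((a.length : Int) - (mN : Int) + 1)
          ((b.length : Int) - (mN : Int) + 1) (i : Int) =
        pvBFind a (pvRows (mN : Int) a b (List.replicate b.length 0)) (mN : Int)
          ((a.length : Int) - (mN : Int) + 1) (i : Int) := by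
  intro i
  induction hfuel : a.length + 1 - i generalizing i with
  | zero =>
      rw [pvAOuter, pvBFind, dif_neg (by omega), dif_neg (by omega)]
  | succ fuel ih =>
      rw [pvAOuter, pvBFind]
      by_cases hlt : (i : Int) < (a.length : Int) - (mN : Int) + 1
      · have hia : i + mN ≤ a.length := by push_cast at hlt; omega
        rw [dif_pos hlt, dif_pos hlt, pvOkEntry mN a b i hm hia]
        by_cases hex : ∃ j : Nat, j + mN ≤ b.length ∧ (b.drop j).take mN = (a.drop i).take mN
        · have hB : pvAnyRow (mN : Int) b ((a.take (i + mN)).reverse) = true :=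
            (pvAnyRow_iff mN a b i hm hia).mpr hex
          have hA := (pvAInner_iff mN a b i).mpr hex
          rcases hcase : pvAInner b
              (PySem.List.slice a (some (i : Int)) (some ((i : Int) + (mN : Int)))) (mN : Int)
              ((b.length : Int) - (mN : Int) + 1) 0 with _ | v
          · exact absurd hcase hA
          · have h2 := hcase
            rw [pvAInner_eq] at h2
            have hv : v = PySem.List.slice a (some (i : Int)) (some ((i : Int) + (mN : Int))) := by
              split_ifs at h2 with hc
              exact (Option.some.inj h2).symm
            simp [hv, hB]
        · have hB : pvAnyRow (mN : Int) b ((a.take (i + mN)).reverse) = false := by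
            rw [← Bool.not_eq_true, pvAnyRow_iff mN a b i hm hia]; exact hex
          have hA : pvAInner b
              (PySem.List.slice a (some (i : Int)) (some ((i : Int) + (mN : Int)))) (mN : Int)
              ((b.length : Int) - (mN : Int) + 1) 0 = none := by
            by_contra hc
            exact hex ((pvAInner_iff mN a b i).mp hc)
          rw [hA, hB]
          simp only [Option.getD_some, Bool.false_eq_true, if_false]
          have hcast : (i : Int) + 1 = ((i + 1 : Nat) : Int) := by omega
          rw [hcast, ih (i + 1) (by omega)]
      · rw [dif_neg hlt, dif_neg hlt]

-- ===== VERDICT (by name: the statement is the Claim_ definition above) =====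
theorem consecutive_overlap_py_spec : Claim_equal_consecutive_overlap_py := by
  intro a b m _ hpre
  have hnn : 0 ≤ m := hpre
  unfold Spec_consecutive_overlap_py consecutive_overlap_py consecutive_overlap_py_alt
  rcases lt_or_eq_of_le hnn with hm0 | hz
  · -- 0 < min_run
    rw [if_neg (by omega : ¬ m ≤ 0)]
    by_cases h : (a.length : Int) < m ∨ (b.length : Int) < m
    · simp [h]
    · rw [if_neg h, if_neg h]
      obtain ⟨mN, rfl⟩ := Int.eq_ofNat_of_zero_le hm0.le
      have := pvScan_eq mN a b (by exact_mod_cast hm0) 0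
      simpa using this
  · -- min_run = 0: A matches the empty window immediately, B's guard returns []
    subst hz
    rw [if_pos (le_refl (0 : Int)),
      if_neg (by omega : ¬ ((a.length : Int) < 0 ∨ (b.length : Int) < 0))]
    rw [pvAOuter, dif_pos (by omega), pvAInner, dif_pos (by omega),
      if_pos (by simp [pysem])]
    simp [pysem]
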